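-- pv_equiv track=rewrite | github.com/nextdesusu/Learn-Python | SICP/examples/ex1_11.py | f_iter
-- ===== SOURCE A (Python) =====
-- def f_iter(n):
--     if n < 3:
--         return n
--     num1 = 2
--     num2 = 1
--     num3 = 0
--     num = 0
--     for i in range(1, n):
--         num = num1 + num2 + num3
--         num3 = num2
--         num2 = num1
--         num1 = num
--     return num2
-- ===== SOURCE B (Python) =====
-- def f_iter(n):
--     if n < 3:
--         return n
--     def mul(A, B):
--         a, b, c, d, e, f, g, h, i = A
--         j, k, l, m, o, p, q, r, s = B
--         return (a*j + b*m + c*q, a*k + b*o + c*r, a*l + b*p + c*s,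
--                 d*j + e*m + f*q, d*k + e*o + f*r, d*l + e*p + f*s,
--                 g*j + h*m + i*q, g*k + h*o + i*r, g*l + h*p + i*s)
--     def matpow(M, k):
--         if k == 0:
--             return (1, 0, 0, 0, 1, 0, 0, 0, 1)
--         H = matpow(M, k // 2)
--         S = mul(H, H)
--         return mul(M, S) if k % 2 == 1 else S
--     P = matpow((1, 1, 1, 1, 0, 0, 0, 1, 0), n - 1)
--     # P * (2, 1, 0) = (f(n+1), f(n), f(n-1)); return the middle component
--     a, b, c, d, e, f, g, h, i = P
--     return 2*d + e
-- ===== Notes on version B (the rewrite author's own statement) =====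
-- stated objective: faster
-- what changed: Replaced the linear shift-register loop by binary exponentiation of the recurrence's 3x3 transition matrix applied to the seed vector (2,1,0); intended as faster (O(log n) vs O(n) steps), measured markedly faster at the mid probe sizes but unconfirmed at the largest.
import Mathlib
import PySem

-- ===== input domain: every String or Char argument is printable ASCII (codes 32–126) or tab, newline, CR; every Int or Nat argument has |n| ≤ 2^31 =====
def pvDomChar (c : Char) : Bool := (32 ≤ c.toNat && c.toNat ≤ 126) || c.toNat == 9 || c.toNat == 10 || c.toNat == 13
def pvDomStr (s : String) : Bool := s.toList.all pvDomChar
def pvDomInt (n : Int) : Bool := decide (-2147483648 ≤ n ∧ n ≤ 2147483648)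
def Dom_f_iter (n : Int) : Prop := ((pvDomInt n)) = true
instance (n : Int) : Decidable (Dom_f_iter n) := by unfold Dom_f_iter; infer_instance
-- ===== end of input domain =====

-- B replaces A's linear loop by binary exponentiation of the recurrence's 3x3 transition
-- matrix; intended as faster (O(log n) vs O(n) steps; unconfirmed at the largest probe size).

-- ===== PORT A =====
def f_iter (n : Int) : Int :=
  if n < 3 then n
  else
    let st :=
      (PySem.List.pyRange 1 n 1).foldl
        (fun (s : Int × Int × Int × Int) _ =>
          let num := s.1 + s.2.1 + s.2.2.1
          (num, s.1, s.2.1, num))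
        (2, 1, 0, 0)
    st.2.1

-- ===== PORT B =====
-- a 3x3 integer matrix, row-major, as in Source B's 9-tuples
structure Mat3 where
  a : Int
  b : Int
  c : Int
  d : Int
  e : Int
  f : Int
  g : Int
  h : Int
  i : Int
deriving DecidableEq, Repr

def mul3 (A B : Mat3) : Mat3 :=
  ⟨A.a*B.a + A.b*B.d + A.c*B.g, A.a*B.b + A.b*B.e + A.c*B.h, A.a*B.c + A.b*B.f + A.c*B.i,
   A.d*B.a + A.e*B.d + A.f*B.g, A.d*B.b + A.e*B.e + A.f*B.h, A.d*B.c + A.e*B.f + A.f*B.i,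
   A.g*B.a + A.h*B.d + A.i*B.g, A.g*B.b + A.h*B.e + A.i*B.h, A.g*B.c + A.h*B.f + A.i*B.i⟩

def id3 : Mat3 := ⟨1,0,0,0,1,0,0,0,1⟩

def matpow3 (M : Mat3) (k : Nat) : Mat3 :=
  if hk : k = 0 then id3
  else
    let H := matpow3 M (k / 2)
    let S := mul3 H H
    if k % 2 = 1 then mul3 M S else S
decreasing_by exact Nat.div_lt_self (Nat.pos_of_ne_zero hk) (by norm_num)

def f_iter_alt (n : Int) : Int :=
  if n < 3 then n
  else
    let P := matpow3 ⟨1,1,1,1,0,0,0,1,0⟩ (n - 1).toNat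
    2 * P.d + P.e

-- ===== PRECONDITION & SPEC =====
def Spec_f_iter (n : Int) (out : Int) : Prop := out = f_iter_alt n
instance (n : Int) (out : Int) : Decidable (Spec_f_iter n out) := by unfold Spec_f_iter; infer_instance

-- ===== CLAIM (what is proved, stated in full; the proofs are below) =====
def Claim_equal_f_iter : Prop := ∀ (n : Int), Dom_f_iter n → Spec_f_iter n (f_iter n)

-- ===== LEMMAS AND PROOFS =====

-- the "tribonacci" sequence A computes: t 0 = 0, t 1 = 1, t 2 = 2, t (k+3) = sum of previous three
def trib : Nat → Int
  | 0 => 0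
  | 1 => 1
  | 2 => 2
  | (k+3) => trib (k+2) + trib (k+1) + trib k

-- A's loop body as a function of the state alone
def stepA (s : Int × Int × Int × Int) : Int × Int × Int × Int :=
  (s.1 + s.2.1 + s.2.2.1, s.1, s.2.1, s.1 + s.2.1 + s.2.2.1)

lemma foldl_const_iterate {α β : Type} (g : α → α) (l : List β) (s : α) :
    l.foldl (fun t _ => g t) s = g^[l.length] s := by
  induction l generalizing s with
  | nil => rfl
  | cons x xs ih => simp [List.foldl, ih, Function.iterate_succ_apply]

lemma iterate_stepA (k : Nat) :
    ((stepA^[k] (2,1,0,0)).1 = trib (k+2)) ∧ ((stepA^[k] (2,1,0,0)).2.1 = trib (k+1)) ∧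
    ((stepA^[k] (2,1,0,0)).2.2.1 = trib k) := by
  induction k with
  | zero => simp [trib]
  | succ k ih =>
    obtain ⟨h1, h2, h3⟩ := ih
    rw [Function.iterate_succ_apply']
    refine ⟨?_, ?_, ?_⟩ <;> simp [stepA, h1, h2, h3, trib]

-- naive matrix power, the specification for matpow3
def npow3 (M : Mat3) : Nat → Mat3
  | 0 => id3
  | (k+1) => mul3 M (npow3 M k)

lemma mul3_assoc (A B C : Mat3) : mul3 (mul3 A B) C = mul3 A (mul3 B C) := by
  simp only [mul3, Mat3.mk.injEq]
  refine ⟨?_, ?_, ?_, ?_, ?_, ?_, ?_, ?_, ?_⟩ <;> ring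

lemma npow3_add (M : Mat3) (x y : Nat) : npow3 M (x + y) = mul3 (npow3 M x) (npow3 M y) := by
  induction x with
  | zero => simp [npow3, mul3, id3]
  | succ x ih =>
    have : x + 1 + y = (x + y) + 1 := by omega
    rw [this, npow3, ih, npow3, mul3_assoc]

lemma matpow3_eq_npow3 (M : Mat3) (k : Nat) : matpow3 M k = npow3 M k := by
  induction k using Nat.strong_induction_on with
  | _ k ih =>
    rw [matpow3]
    by_cases hk : k = 0
    · simp [hk, npow3]
    · simp only [hk, dite_false]
      have ihh := ih (k / 2) (Nat.div_lt_self (Nat.pos_of_ne_zero hk) (by norm_num))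
      by_cases hm : k % 2 = 1
      · have hk2 : k = (k / 2 + k / 2) + 1 := by omega
        simp only [hm, if_true, ihh]
        rw [← npow3_add]
        conv_rhs => rw [hk2]
        rw [npow3]
      · have hk2 : k = k / 2 + k / 2 := by omega
        simp only [hm, if_false, ihh]
        rw [← npow3_add, ← hk2]

lemma npow3_trib (k : Nat) :
    (2 * (npow3 ⟨1,1,1,1,0,0,0,1,0⟩ k).a + (npow3 ⟨1,1,1,1,0,0,0,1,0⟩ k).b = trib (k+2)) ∧
    (2 * (npow3 ⟨1,1,1,1,0,0,0,1,0⟩ k).d + (npow3 ⟨1,1,1,1,0,0,0,1,0⟩ k).e = trib (k+1)) ∧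
    (2 * (npow3 ⟨1,1,1,1,0,0,0,1,0⟩ k).g + (npow3 ⟨1,1,1,1,0,0,0,1,0⟩ k).h = trib k) := by
  induction k with
  | zero => simp [npow3, id3, trib]
  | succ k ih =>
    obtain ⟨h1, h2, h3⟩ := ih
    have ht : trib (k + 1 + 2) = trib (k + 2) + trib (k + 1) + trib k := by
      rw [show k + 1 + 2 = k + 3 from rfl, trib]
    refine ⟨?_, ?_, ?_⟩ <;> simp only [npow3, mul3] <;> linarith [h1, h2, h3, ht]

-- ===== VERDICT (by name: the statement is the Claim_ definition above) =====
theorem f_iter_spec : Claim_equal_f_iter := by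
  intro n _
  unfold Spec_f_iter f_iter f_iter_alt
  by_cases h : n < 3
  · simp [h]
  · simp only [h, if_false]
    have hlen : (PySem.List.pyRange 1 n 1).length = (n - 1).toNat :=
      PySem.List.length_pyRange_one 1 n
    set k := (n - 1).toNat with hk
    have hA : (PySem.List.pyRange 1 n 1).foldl
        (fun (s : Int × Int × Int × Int) _ =>
          let num := s.1 + s.2.1 + s.2.2.1
          (num, s.1, s.2.1, num)) (2, 1, 0, 0) = stepA^[k] (2,1,0,0) := by
      rw [show (fun (s : Int × Int × Int × Int) _ =>
          let num := s.1 + s.2.1 + s.2.2.1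
          (num, s.1, s.2.1, num)) = (fun (s : Int × Int × Int × Int) (_ : Int) => stepA s) from rfl,
        foldl_const_iterate, hlen]
    rw [hA, (iterate_stepA k).2.1, matpow3_eq_npow3, (npow3_trib k).2.1]
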